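-- pv_equiv track=rewrite | github.com/jaeminSon/problem_solving | foobar/2nd-2.py | solution
-- ===== SOURCE A (Python) =====
-- def solution(s):
--     # Your code here
--     length = len(s)
--
--     def count_sallute(index_start, direction):
--         n_meets = 0
--         indices_to_check = range(index_start+1,length) if direction=="r" else range(0, index_start)
--         for j in indices_to_check:
--             if s[j] != "-" and s[index_start] != s[j]:
--                 n_meets+=1
--         return n_meets
--
--     count = 0
--     for i in range(length):
--         if s[i] == ">":
--             count+=count_sallute(i, "r")
--         elif s[i] == "<":
--             count+=count_sallute(i, "l")
--     return count
-- ===== SOURCE B (Python) =====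
-- def solution(s):
--     count = 0
--     gt_seen = 0       # '>' seen so far
--     movers_seen = 0   # chars seen so far that are neither '-' nor '<'
--     for c in s:
--         if c != "-" and c != ">":
--             count += gt_seen
--         if c == "<":
--             count += movers_seen
--         if c == ">":
--             gt_seen += 1
--         if c != "-" and c != "<":
--             movers_seen += 1
--     return count
-- ===== Notes on version B (the rewrite author's own statement) =====
-- stated objective: alternative
-- what changed: Replaced A's nested pairwise scans (for every '>'/'<' rescan the rest of the string) by a single left-to-right pass keeping two running counters ('>' seen so far, and non-'-'/non-'<' chars seen so far).
import Mathlib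
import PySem

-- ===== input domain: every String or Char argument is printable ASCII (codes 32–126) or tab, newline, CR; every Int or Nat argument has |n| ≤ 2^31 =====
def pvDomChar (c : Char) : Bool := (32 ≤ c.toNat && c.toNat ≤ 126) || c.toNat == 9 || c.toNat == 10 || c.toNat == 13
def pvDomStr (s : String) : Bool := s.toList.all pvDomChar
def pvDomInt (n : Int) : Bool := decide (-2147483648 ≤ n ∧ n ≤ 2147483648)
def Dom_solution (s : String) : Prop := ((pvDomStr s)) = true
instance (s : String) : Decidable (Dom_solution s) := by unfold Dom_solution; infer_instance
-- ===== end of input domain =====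

-- B replaces A's nested pairwise scans by one left-to-right pass with two running counters (same value, different algorithm).

-- ===== PORT A =====
-- inner helper count_sallute: indices produced by range() are always in [0, length),
-- so the list indexing s[j] / s[index_start] never raises; pyGetD's default ' ' is never used.
def pvCountSallute (l : List Char) (length : Nat) (index_start : Int) (direction : String) : Int :=
  let indices_to_check : List Int :=
    if direction = "r" then PySem.List.pyRange (index_start + 1) (length : Int)
    else PySem.List.pyRange 0 index_start
  indices_to_check.foldl
    (fun n_meets j =>
      if PySem.List.pyGetD l j ' ' ≠ '-' ∧ PySem.List.pyGetD l index_start ' ' ≠ PySem.List.pyGetD l j ' '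
      then n_meets + 1 else n_meets) 0

def solution (s : String) : Int :=
  let l := s.toList
  let length := l.length
  (PySem.List.pyRange 0 (length : Int)).foldl
    (fun count i =>
      if PySem.List.pyGetD l i ' ' = '>' then count + pvCountSallute l length i "r"
      else if PySem.List.pyGetD l i ' ' = '<' then count + pvCountSallute l length i "l"
      else count) 0

-- ===== PORT B =====
-- state = (count, gt_seen, movers_seen), exactly Source B's accumulators, one pass over the string
def solution_alt (s : String) : Int :=
  (s.toList.foldl
    (fun (st : Int × Int × Int) c =>
      let count := st.1
      let gt_seen := st.2.1
      let movers_seen := st.2.2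
      let count := if c ≠ '-' ∧ c ≠ '>' then count + gt_seen else count
      let count := if c = '<' then count + movers_seen else count
      let gt_seen := if c = '>' then gt_seen + 1 else gt_seen
      let movers_seen := if c ≠ '-' ∧ c ≠ '<' then movers_seen + 1 else movers_seen
      (count, gt_seen, movers_seen)) (0, 0, 0)).1

-- ===== PRECONDITION & SPEC =====
def Spec_solution (s : String) (out : Int) : Prop := out = solution_alt s
instance (s : String) (out : Int) : Decidable (Spec_solution s out) := by unfold Spec_solution; infer_instance

-- ===== CLAIM (what is proved, stated in full; the proofs are below) =====
def Claim_equal_solution : Prop := ∀ (s : String), Dom_solution s → Spec_solution s (solution s)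

-- ===== LEMMAS AND PROOFS =====

-- counters (as Int): chars that can meet a '>' to their left / '<' chars
def pvCgt (l : List Char) : Int := (l.countP (fun d => d ≠ '-' ∧ d ≠ '>') : Int)
def pvClt (l : List Char) : Int := (l.countP (fun d => d = '<') : Int)
def pvP : List Char → Int
  | [] => 0
  | c :: r => (if c = '>' then pvCgt r else 0) + (if c ≠ '-' ∧ c ≠ '<' then pvClt r else 0) + pvP r

-- A's positional contribution: what the i-th loop iteration of A adds
def pvTerm (l : List Char) (i : Nat) : Int :=
  if l.getD i ' ' = '>' then pvCgt (l.drop (i + 1))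
  else if l.getD i ' ' = '<' then (((l.take i).countP (fun d => d ≠ '-' ∧ d ≠ '<') : Nat) : Int)
  else 0

-- pyRange on nat casts is a mapped List.range'
theorem pvPyRange_cast (k : Nat) : ∀ (a : Nat), PySem.List.pyRange (a : Int) ((a + k : Nat) : Int)
    = List.map (fun j : Nat => (j : Int)) (List.range' a k) := by
  induction k with
  | zero => intro a; simp [PySem.List.pyRange]
  | succ k ih =>
    intro a
    have h : (a : Int) < ((a + (k + 1) : Nat) : Int) := by push_cast; omega
    rw [PySem.List.pyRange_one_cons h]
    have e1 : (a : Int) + 1 = ((a + 1 : Nat) : Int) := by push_cast; ring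
    have e2 : ((a + (k + 1) : Nat) : Int) = (((a + 1) + k : Nat) : Int) := by push_cast; ring
    rw [e1, e2, ih (a + 1), List.range'_succ]
    simp

-- counting over an index range equals counting over the corresponding slice
theorem pvCount_range' (l : List Char) (p : Char → Bool) :
    ∀ (k a : Nat), a + k ≤ l.length →
    List.countP (fun j => p (l.getD j ' ')) (List.range' a k)
      = List.countP p ((l.drop a).take k) := by
  intro k
  induction k with
  | zero => intro a h; simp
  | succ k ih =>
    intro a h
    have ha : a < l.length := by omega
    rw [List.range'_succ, List.drop_eq_getElem_cons ha, List.take_succ_cons,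
        List.countP_cons, List.countP_cons, ih (a + 1) (by omega),
        List.getD_eq_getElem l ' ' ha]

-- a ≠ d and d ≠ a count the same elements
theorem pvCount_flip (a : Char) (S : List Char) :
    List.countP (fun d => decide (d ≠ '-' ∧ a ≠ d)) S
      = List.countP (fun d => decide (d ≠ '-' ∧ d ≠ a)) S := by
  apply List.countP_congr
  intro x _
  simp only [decide_eq_true_eq, ne_eq]
  constructor
  · rintro ⟨u, v⟩; exact ⟨u, fun h => v h.symm⟩
  · rintro ⟨u, v⟩; exact ⟨u, fun h => v h.symm⟩

-- A's inner helper, '>' side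
theorem pvCS_r (l : List Char) (j : Nat) (hj : j < l.length) (hgt : l.getD j ' ' = '>') :
    pvCountSallute l l.length (j : Int) "r" = pvCgt (l.drop (j + 1)) := by
  unfold pvCountSallute
  simp only [reduceIte]
  have e1 : ((j : Int) + 1) = ((j + 1 : Nat) : Int) := by push_cast; ring
  have e2 : ((l.length : Nat) : Int) = (((j + 1) + (l.length - (j + 1)) : Nat) : Int) := by
    push_cast; omega
  rw [e1, e2, pvPyRange_cast, List.foldl_map]
  have hfun : (fun (n_meets : Int) (x : Nat) =>
      if PySem.List.pyGetD l (x : Int) ' ' ≠ '-' ∧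
         PySem.List.pyGetD l ((j : Nat) : Int) ' ' ≠ PySem.List.pyGetD l (x : Int) ' '
      then n_meets + 1 else n_meets)
      = (fun (n_meets : Int) (x : Nat) =>
      if (fun y => decide (l.getD y ' ' ≠ '-' ∧ l.getD j ' ' ≠ l.getD y ' ')) x = true
      then n_meets + 1 else n_meets) := by
    funext n x
    simp [PySem.List.pyGetD_natCast]
  rw [hfun, PySem.List.foldl_count_if,
      pvCount_range' l (fun d => decide (d ≠ '-' ∧ l.getD j ' ' ≠ d)) (l.length - (j + 1)) (j + 1) (by omega),
      List.take_of_length_le (by simp)]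
  simp only [hgt]
  rw [pvCount_flip]
  simp [pvCgt]

-- A's inner helper, '<' side
theorem pvCS_l (l : List Char) (j : Nat) (hj : j < l.length) (hlt : l.getD j ' ' = '<') :
    pvCountSallute l l.length (j : Int) "l"
      = (((l.take j).countP (fun d => d ≠ '-' ∧ d ≠ '<') : Nat) : Int) := by
  unfold pvCountSallute
  simp only [String.reduceEq, reduceIte]
  rw [show ((j : Nat) : Int) = ((0 + j : Nat) : Int) by push_cast; ring,
      show ((0 : Int)) = ((0 : Nat) : Int) by norm_num,
      pvPyRange_cast, List.foldl_map]
  have hfun : (fun (n_meets : Int) (x : Nat) =>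
      if PySem.List.pyGetD l (x : Int) ' ' ≠ '-' ∧
         PySem.List.pyGetD l ((0 + j : Nat) : Int) ' ' ≠ PySem.List.pyGetD l (x : Int) ' '
      then n_meets + 1 else n_meets)
      = (fun (n_meets : Int) (x : Nat) =>
      if (fun y => decide (l.getD y ' ' ≠ '-' ∧ l.getD j ' ' ≠ l.getD y ' ')) x = true
      then n_meets + 1 else n_meets) := by
    funext n x
    simp [PySem.List.pyGetD_natCast]
  rw [hfun, PySem.List.foldl_count_if,
      pvCount_range' l (fun d => decide (d ≠ '-' ∧ l.getD j ' ' ≠ d)) j 0 (by omega)]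
  simp only [List.drop_zero, hlt]
  rw [pvCount_flip]
  simp

theorem pvA_eq_sum (l : List Char) :
    (PySem.List.pyRange 0 (l.length : Int)).foldl
      (fun count i =>
        if PySem.List.pyGetD l i ' ' = '>' then count + pvCountSallute l l.length i "r"
        else if PySem.List.pyGetD l i ' ' = '<' then count + pvCountSallute l l.length i "l"
        else count) 0
      = ((List.range l.length).map (pvTerm l)).sum := by
  have h0 : PySem.List.pyRange 0 (l.length : Int)
      = List.map (fun j : Nat => (j : Int)) (List.range l.length) := by
    have := pvPyRange_cast l.length 0
    simpa [List.range_eq_range'] using this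
  rw [h0, List.foldl_map,
      PySem.List.foldl_congr_mem _ _ (fun (count : Int) (j : Nat) => count + pvTerm l j) 0 ?_,
      PySem.List.foldl_add]
  · simp
  · intro acc x hx
    have hxl : x < l.length := List.mem_range.mp hx
    simp only [PySem.List.pyGetD_natCast]
    unfold pvTerm
    by_cases h1 : l.getD x ' ' = '>'
    · rw [if_pos h1, if_pos h1, pvCS_r l x hxl h1]
    · rw [if_neg h1, if_neg h1]
      by_cases h2 : l.getD x ' ' = '<'
      · rw [if_pos h2, if_pos h2, pvCS_l l x hxl h2]
      · rw [if_neg h2, if_neg h2]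
        ring

theorem pvSum_eq_P (l : List Char) : ((List.range l.length).map (pvTerm l)).sum = pvP l := by
  induction l with
  | nil => simp [pvP]
  | cons c r ih =>
    rw [List.length_cons, List.range_succ_eq_map, List.map_cons, List.map_map, List.sum_cons]
    have hterm : List.map (pvTerm (c :: r) ∘ Nat.succ) (List.range r.length)
        = List.map (fun x => pvTerm r x
            + (if r.getD x ' ' = '<' then (if c ≠ '-' ∧ c ≠ '<' then (1 : Int) else 0) else 0))
            (List.range r.length) := by
      apply List.map_congr_left
      intro x hx
      simp only [Function.comp_apply]
      show pvTerm (c :: r) (x + 1) = _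
      unfold pvTerm
      rw [List.getD_cons_succ]
      by_cases h1 : r.getD x ' ' = '>'
      · have h2 : ¬ r.getD x ' ' = '<' := by rw [h1]; decide
        rw [if_pos h1, if_pos h1, if_neg h2, List.drop_succ_cons]
        ring
      · rw [if_neg h1, if_neg h1]
        by_cases h2 : r.getD x ' ' = '<'
        · rw [if_pos h2, if_pos h2, if_pos h2, List.take_succ_cons, List.countP_cons]
          by_cases h3 : c ≠ '-' ∧ c ≠ '<'
          · rw [if_pos h3, if_pos (by simpa using h3)]
            push_cast
            ring
          · rw [if_neg h3, if_neg (by simpa using h3)]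
            push_cast
            ring
        · rw [if_neg h2, if_neg h2, if_neg h2]
          ring
    rw [hterm, PySem.List.sum_map_add_int]
    have hsum2 : (List.map (fun x => (if r.getD x ' ' = '<' then (if c ≠ '-' ∧ c ≠ '<' then (1 : Int) else 0) else 0)) (List.range r.length)).sum
        = (if c ≠ '-' ∧ c ≠ '<' then pvClt r else 0) := by
      by_cases h3 : c ≠ '-' ∧ c ≠ '<'
      · simp only [if_pos h3]
        have hcnt : (List.map (fun x => (if r.getD x ' ' = '<' then (1 : Int) else 0)) (List.range r.length)).sum
            = ((List.range r.length).countP (fun x => decide (r.getD x ' ' = '<')) : Int) := by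
          rw [← PySem.List.sum_map_ite_one_zero (fun x => decide (r.getD x ' ' = '<')) (List.range r.length)]
          simp
        rw [hcnt, List.range_eq_range',
            pvCount_range' r (fun d => decide (d = '<')) r.length 0 (by omega)]
        simp only [List.drop_zero, List.take_of_length_le (le_refl r.length)]
        simp [pvClt]
      · simp only [if_neg h3]
        simp
    rw [hsum2, ih]
    have hhead : pvTerm (c :: r) 0 = (if c = '>' then pvCgt r else 0) := by
      unfold pvTerm
      simp only [List.getD_cons_zero, List.drop_succ_cons, List.drop_zero, List.take_zero]
      by_cases h1 : c = '>'
      · rw [if_pos h1, if_pos h1]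
      · rw [if_neg h1, if_neg h1]
        by_cases h2 : c = '<'
        · rw [if_pos h2]; simp
        · rw [if_neg h2]
    rw [hhead,
        show pvP (c :: r) = (if c = '>' then pvCgt r else 0)
          + (if c ≠ '-' ∧ c ≠ '<' then pvClt r else 0) + pvP r from rfl]
    ring

theorem pvB_inv (l : List Char) : ∀ (count gt movers : Int),
    (l.foldl
      (fun (st : Int × Int × Int) c =>
        let count := st.1
        let gt_seen := st.2.1
        let movers_seen := st.2.2
        let count := if c ≠ '-' ∧ c ≠ '>' then count + gt_seen else count
        let count := if c = '<' then count + movers_seen else count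
        let gt_seen := if c = '>' then gt_seen + 1 else gt_seen
        let movers_seen := if c ≠ '-' ∧ c ≠ '<' then movers_seen + 1 else movers_seen
        (count, gt_seen, movers_seen)) (count, gt, movers)).1
      = count + pvP l + gt * pvCgt l + movers * pvClt l := by
  induction l with
  | nil => intro count gt movers; simp [pvP, pvCgt, pvClt]
  | cons c r ih =>
    intro count gt movers
    rw [List.foldl_cons]
    simp only []
    rw [ih]
    by_cases h1 : c = '-'
    · simp [h1, pvP, pvCgt, pvClt]
    · by_cases h2 : c = '<'
      · simp only [h2]
        simp [pvP, pvCgt, pvClt]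
        ring
      · by_cases h3 : c = '>'
        · simp only [h3]
          simp [pvP, pvCgt, pvClt]
          ring
        · simp [h1, h2, h3, pvP, pvCgt, pvClt]
          ring

-- ===== VERDICT (by name: the statement is the Claim_ definition above) =====
theorem solution_spec : Claim_equal_solution := by
  intro s _
  unfold Spec_solution solution solution_alt
  rw [pvA_eq_sum s.toList, pvSum_eq_P, pvB_inv s.toList 0 0 0]
  ring
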